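-- pv_equiv track=rewrite | github.com/almostseoul/SnowySeoul | chosun_pop/poppop.py | slice_by_idx
-- ===== SOURCE A (Python) =====
-- def slice_by_idx(cha, idx_list, side='front'):
--     """
--     Slice a string by its index point.
--     side option can have 'front', 'end' or 'tuple'. 'front' or 'end' means where is the splicing point to the index.
--     If side == 'tuple', idx_list should be the list of tuples, which have couple value of (index, lenght).
--     """
--
--     if type(idx_list) == int:
--         idx_list = [idx_list]
--
--     if len(idx_list) == 0:
--         cha_list = [cha]
--
--     else:
--         if side == 'front':
--
--             if len(idx_list) == 1:
--                 i = idx_list[0]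
--                 cha_list = [cha[:i], cha[i:]]
--
--             else:
--                 cha_list = []
--                 for j, i in enumerate(idx_list):
--                     if j == 0:
--                         cha_list.append(cha[:i])
--                     elif j == len(idx_list)-1:
--                         cha_list.extend([cha[idx_list[j-1]:i], cha[i:]])
--                     else:
--                         cha_list.append(cha[idx_list[j-1]:i])
--
--         elif side == 'end':
--
--             if len(idx_list) == 1:
--                 i = idx_list[0]
--                 cha_list = [cha[:i+1], cha[i+1:]]
--
--             else:
--                 cha_list = []
--                 for j, i in enumerate(idx_list):
--                     if j == 0:
--                         cha_list.append(cha[:i+1])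
--                     elif j == len(idx_list)-1:
--                         cha_list.extend([cha[idx_list[j-1]+1:i+1], cha[i+1:]])
--                     else:
--                         cha_list.append(cha[idx_list[j-1]+1:i+1])
--
--         elif side == 'tuple': # 이 옵션은 (i, lenth) 튜플을 원소로 갖는 리스트 idx_list를 사용
--                               # tuple[0]은 시작 idx, tuple[1]은 그 길이 # 길이 오버랩은 없을 것이라 가정!
--
--             if len(idx_list) == 1:
--                 i, l = idx_list[0][0], idx_list[0][1]
--                 cha_list = [cha[:i], cha[i:i+l], cha[i+l:]]
--
--             else:
--                 cha_list = []
--                 for j, idx_tuple in enumerate(idx_list):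
--                     i, l = idx_tuple[0], idx_tuple[1]
--                     if j == 0:
--                         cha_list.extend([cha[:i], cha[i:i+l]])
--                     else:
--                         pi, pl = idx_list[j-1][0], idx_list[j-1][1]
--                         if j == len(idx_list)-1:
--                             cha_list.extend([cha[pi+pl:i], cha[i:i+l], cha[i+l:]])
--                         else:
--                             cha_list.extend([cha[pi+pl:i], cha[i:i+l]])
--
--     cha_list = [a for a in cha_list if a != ""]
--     return cha_list
-- ===== SOURCE B (Python) =====
-- def slice_by_idx(cha, idx_list, side='front'):
--     # Boundary-pairing re-implementation: build the list of cut points once, then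
--     # slice between consecutive boundaries in one uniform pass.
--     # ('tuple' mode of the original takes (index, length) pairs and is outside the
--     # int-list domain of this claim; an unrecognized side raises here as it does in A.)
--     if type(idx_list) == int:
--         idx_list = [idx_list]
--     if len(idx_list) == 0:
--         return [p for p in [cha] if p != ""]
--     if side == 'front':
--         bounds = [0] + list(idx_list)
--     elif side == 'end':
--         bounds = [0] + [i + 1 for i in idx_list]
--     pieces = [cha[a:b] for a, b in zip(bounds, bounds[1:])]
--     pieces.append(cha[bounds[-1]:])
--     return [p for p in pieces if p != ""]
-- ===== Notes on version B (the rewrite author's own statement) =====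
-- stated objective: simpler
-- what changed: Replaces A's three enumerate loops with first/middle/last special cases by building a boundary list once and slicing between consecutive boundaries in one uniform pass.
import Mathlib
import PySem

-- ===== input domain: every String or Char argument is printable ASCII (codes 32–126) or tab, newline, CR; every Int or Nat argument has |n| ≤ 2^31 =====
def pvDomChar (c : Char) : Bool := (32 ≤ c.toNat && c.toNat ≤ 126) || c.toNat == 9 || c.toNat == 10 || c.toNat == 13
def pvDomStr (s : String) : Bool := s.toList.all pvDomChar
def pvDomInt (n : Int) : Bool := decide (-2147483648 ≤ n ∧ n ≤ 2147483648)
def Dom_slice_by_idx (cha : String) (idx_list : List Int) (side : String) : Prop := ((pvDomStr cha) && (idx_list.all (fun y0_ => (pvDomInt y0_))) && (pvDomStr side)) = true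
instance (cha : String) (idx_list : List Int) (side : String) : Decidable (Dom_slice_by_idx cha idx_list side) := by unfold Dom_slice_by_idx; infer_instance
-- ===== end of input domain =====

-- B replaces A's three first/middle/last-special-cased enumerate loops by one boundary
-- list sliced between consecutive cut points in a single uniform pass (objective: simpler).

-- ===== PORT A =====
-- Literal port of A. The 'type(idx_list) == int' coercion cannot fire (idx_list is a list
-- here). For side = 'tuple' (int elements are not index pairs: TypeError) and for any other
-- unrecognized side with a non-empty idx_list Python raises (UnboundLocalError); those
-- inputs are excluded by Pre_ and the port returns [] there.
def slice_by_idx (cha : String) (idx_list : List Int) (side : String) : List String :=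
  let cha_list : List String :=
    if idx_list.length = 0 then [cha]
    else if side = "front" then
      if idx_list.length = 1 then
        let i := (PySem.List.pyGet? idx_list 0).getD 0
        [PySem.Str.slice cha none (some i), PySem.Str.slice cha (some i) none]
      else
        (PySem.List.enumerate idx_list).foldl (fun acc ji =>
          let j := ji.1
          let i := ji.2
          if j = 0 then acc ++ [PySem.Str.slice cha none (some i)]
          else if j = (idx_list.length : Int) - 1 then
            acc ++ [PySem.Str.slice cha (some ((PySem.List.pyGet? idx_list (j - 1)).getD 0)) (some i),
                    PySem.Str.slice cha (some i) none]
          else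
            acc ++ [PySem.Str.slice cha (some ((PySem.List.pyGet? idx_list (j - 1)).getD 0)) (some i)]) []
    else if side = "end" then
      if idx_list.length = 1 then
        let i := (PySem.List.pyGet? idx_list 0).getD 0
        [PySem.Str.slice cha none (some (i + 1)), PySem.Str.slice cha (some (i + 1)) none]
      else
        (PySem.List.enumerate idx_list).foldl (fun acc ji =>
          let j := ji.1
          let i := ji.2
          if j = 0 then acc ++ [PySem.Str.slice cha none (some (i + 1))]
          else if j = (idx_list.length : Int) - 1 then
            acc ++ [PySem.Str.slice cha (some ((PySem.List.pyGet? idx_list (j - 1)).getD 0 + 1)) (some (i + 1)),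
                    PySem.Str.slice cha (some (i + 1)) none]
          else
            acc ++ [PySem.Str.slice cha (some ((PySem.List.pyGet? idx_list (j - 1)).getD 0 + 1)) (some (i + 1))]) []
    else []  -- Python raises here (excluded by Pre_)
  cha_list.filter (fun a => a ≠ "")

-- ===== PORT B =====
-- Literal port of Source B: boundary list, then one uniform consecutive-pair slicing pass.
def slice_by_idx_alt (cha : String) (idx_list : List Int) (side : String) : List String :=
  if idx_list.length = 0 then
    List.filter (fun p => p ≠ "") [cha]
  else
    let bounds : List Int :=
      if side = "front" then 0 :: idx_list
      else if side = "end" then 0 :: idx_list.map (fun i => i + 1)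
      else []  -- Python raises here (excluded by Pre_)
    let pieces : List String :=
      (bounds.zip bounds.tail).map (fun ab => PySem.Str.slice cha (some ab.1) (some ab.2))
        ++ [PySem.Str.slice cha (some ((PySem.List.pyGet? bounds (-1)).getD 0)) none]
    pieces.filter (fun p => p ≠ "")

-- ===== PRECONDITION & SPEC =====
-- Exactly where A returns normally: with a non-empty idx_list, side must be 'front' or
-- 'end' (side = 'tuple' raises TypeError on int elements, any other side UnboundLocalError).
def Pre_slice_by_idx (cha : String) (idx_list : List Int) (side : String) : Prop :=
  idx_list = [] ∨ side = "front" ∨ side = "end"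
instance (cha : String) (idx_list : List Int) (side : String) : Decidable (Pre_slice_by_idx cha idx_list side) := by unfold Pre_slice_by_idx; infer_instance
def pvWitness_slice_by_idx : String × List Int × String := ("hello world", [3, 7], "front")

def Spec_slice_by_idx (cha : String) (idx_list : List Int) (side : String) (out : List String) : Prop := out = slice_by_idx_alt cha idx_list side
instance (cha : String) (idx_list : List Int) (side : String) (out : List String) : Decidable (Spec_slice_by_idx cha idx_list side out) := by unfold Spec_slice_by_idx; infer_instance

-- ===== CLAIM (what is proved, stated in full; the proofs are below) =====
def Claim_equal_slice_by_idx : Prop := ∀ (cha : String) (idx_list : List Int) (side : String), Dom_slice_by_idx cha idx_list side → Pre_slice_by_idx cha idx_list side → Spec_slice_by_idx cha idx_list side (slice_by_idx cha idx_list side)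

-- ===== LEMMAS AND PROOFS =====

-- the common shape both programs compute: slices between consecutive cut points, from p on
def pvChain (cha : String) (p : Int) : List Int → List String
  | [] => [PySem.Str.slice cha (some p) none]
  | x :: xs => PySem.Str.slice cha (some p) (some x) :: pvChain cha x xs

theorem pvA_loop_tail (cha : String) (g : Int → Int) (idx_list : List Int) :
    ∀ (rest : List Int) (x : Int) (k : Nat) (prev : Int), 1 ≤ k →
      idx_list.drop k = x :: rest → idx_list[k - 1]? = some prev →
      (PySem.List.enumerate (x :: rest) (k : Int)).flatMap (fun ji =>
          if ji.1 = 0 then [PySem.Str.slice cha none (some (g ji.2))]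
          else if ji.1 = (idx_list.length : Int) - 1 then
            [PySem.Str.slice cha (some (g ((PySem.List.pyGet? idx_list (ji.1 - 1)).getD 0))) (some (g ji.2)),
             PySem.Str.slice cha (some (g ji.2)) none]
          else
            [PySem.Str.slice cha (some (g ((PySem.List.pyGet? idx_list (ji.1 - 1)).getD 0))) (some (g ji.2))])
      = pvChain cha (g prev) ((x :: rest).map g) := by
  intro rest
  induction rest with
  | nil =>
    intro x k prev hk hdrop hprev
    have hlen : idx_list.length = k + 1 := by
      have h := congrArg List.length hdrop
      rw [List.length_drop] at h
      have hklt : k < idx_list.length := by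
        rcases Nat.lt_or_ge k idx_list.length with h' | h'
        · exact h'
        · rw [List.drop_eq_nil_of_le h'] at hdrop; simp at hdrop
      simp only [List.length_cons, List.length_nil] at h
      omega
    have c0 : ¬((k : Int) = 0) := by omega
    have hk1 : (k : Int) = (idx_list.length : Int) - 1 := by omega
    have hget : PySem.List.pyGet? idx_list ((k : Int) - 1) = some prev := by
      rw [show ((k : Int) - 1) = ((k - 1 : Nat) : Int) by omega, PySem.List.pyGet?_natCast, hprev]
    simp only [PySem.List.enumerate_cons, PySem.List.enumerate_nil, List.flatMap_cons,
      List.flatMap_nil, List.append_nil]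
    rw [if_neg c0, if_pos hk1, hget]
    simp [pvChain]
  | cons y ys ih =>
    intro x k prev hk hdrop hprev
    have hklt : k < idx_list.length := by
      rcases Nat.lt_or_ge k idx_list.length with h' | h'
      · exact h'
      · rw [List.drop_eq_nil_of_le h'] at hdrop; simp at hdrop
    have hlen : idx_list.length = k + ys.length + 2 := by
      have h := congrArg List.length hdrop
      rw [List.length_drop] at h
      simp only [List.length_cons] at h
      omega
    have c0 : ¬((k : Int) = 0) := by omega
    have ckne : ¬((k : Int) = (idx_list.length : Int) - 1) := by omega
    have hget : PySem.List.pyGet? idx_list ((k : Int) - 1) = some prev := by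
      rw [show ((k : Int) - 1) = ((k - 1 : Nat) : Int) by omega, PySem.List.pyGet?_natCast, hprev]
    have hdrop' : idx_list.drop (k + 1) = y :: ys := by
      rw [← List.tail_drop, hdrop]; rfl
    have hx : idx_list[(k + 1) - 1]? = some x := by
      have h0 : (idx_list.drop k)[0]? = some x := by rw [hdrop]; rfl
      rw [List.getElem?_drop] at h0
      simpa using h0
    have hih := ih y (k + 1) x (by omega) hdrop' hx
    rw [show ((k + 1 : Nat) : Int) = (k : Int) + 1 by push_cast; ring] at hih
    rw [PySem.List.enumerate_cons, List.flatMap_cons, hih]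
    rw [if_neg c0, if_neg ckne, hget]
    simp [pvChain]

-- B's pieces form a chain
theorem pvAlt_pieces_eq_chain (cha : String) (b0 : Int) (rest : List Int) :
    ((b0 :: rest).zip rest).map (fun ab => PySem.Str.slice cha (some ab.1) (some ab.2))
      ++ [PySem.Str.slice cha (some (((b0 :: rest).getLast?).getD 0)) none]
    = pvChain cha b0 rest := by
  induction rest generalizing b0 with
  | nil => simp [pvChain]
  | cons x xs ih =>
    simp only [List.zip_cons_cons, List.map_cons, List.cons_append, pvChain]
    rw [← ih x]
    simp [List.getLast?_cons]

-- Python's cha[0:b] is cha[:b]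
theorem pvSlice_zero (s : String) (b? : Option Int) :
    PySem.Str.slice s (some 0) b? = PySem.Str.slice s none b? := by
  simp [PySem.Str.slice]

-- A's enumerate loop (length ≥ 2), as a flatMap, is a chain: first element special-cased,
-- then the tail lemma from the second element on
theorem pvA_loop (cha : String) (g : Int → Int) (x0 y : Int) (ys : List Int) :
    (PySem.List.enumerate (x0 :: y :: ys) 0).flatMap (fun ji =>
        if ji.1 = 0 then [PySem.Str.slice cha none (some (g ji.2))]
        else if ji.1 = ((x0 :: y :: ys).length : Int) - 1 then
          [PySem.Str.slice cha (some (g ((PySem.List.pyGet? (x0 :: y :: ys) (ji.1 - 1)).getD 0))) (some (g ji.2)),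
           PySem.Str.slice cha (some (g ji.2)) none]
        else
          [PySem.Str.slice cha (some (g ((PySem.List.pyGet? (x0 :: y :: ys) (ji.1 - 1)).getD 0))) (some (g ji.2))])
    = PySem.Str.slice cha none (some (g x0)) :: pvChain cha (g x0) ((y :: ys).map g) := by
  rw [PySem.List.enumerate_cons, List.flatMap_cons]
  rw [show (0 : Int) + 1 = ((1 : Nat) : Int) by norm_num]
  rw [pvA_loop_tail cha g (x0 :: y :: ys) ys y 1 x0 (by omega) rfl rfl]
  rw [if_pos rfl]
  rfl

-- ===== VERDICT (by name: the statement is the Claim_ definition above) =====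
theorem slice_by_idx_spec : Claim_equal_slice_by_idx := by
  intro cha idx_list side _hdom hpre
  unfold Spec_slice_by_idx slice_by_idx slice_by_idx_alt
  cases idx_list with
  | nil => simp
  | cons x0 rest =>
    have hne : ¬((x0 :: rest).length = 0) := by simp
    rw [if_neg hne, if_neg hne]
    rcases hpre with h | h | h
    · simp at h
    · -- side = "front"
      subst h
      rw [if_pos rfl, if_pos rfl]
      simp only [List.tail_cons, PySem.List.pyGet?_neg_one]
      rw [pvAlt_pieces_eq_chain]
      cases rest with
      | nil =>
        rw [if_pos (show [x0].length = 1 from rfl)]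
        simp [pvChain, pvSlice_zero]
      | cons y ys =>
        have h1 : ¬((x0 :: y :: ys).length = 1) := by simp
        rw [if_neg h1]
        have hbody : (fun (acc : List String) (ji : Int × Int) =>
            if ji.1 = 0 then acc ++ [PySem.Str.slice cha none (some ji.2)]
            else if ji.1 = ((x0 :: y :: ys).length : Int) - 1 then
              acc ++ [PySem.Str.slice cha (some ((PySem.List.pyGet? (x0 :: y :: ys) (ji.1 - 1)).getD 0)) (some ji.2),
                      PySem.Str.slice cha (some ji.2) none]
            else
              acc ++ [PySem.Str.slice cha (some ((PySem.List.pyGet? (x0 :: y :: ys) (ji.1 - 1)).getD 0)) (some ji.2)])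
            = fun acc ji => acc ++ (fun (ji : Int × Int) =>
            if ji.1 = 0 then [PySem.Str.slice cha none (some ji.2)]
            else if ji.1 = ((x0 :: y :: ys).length : Int) - 1 then
              [PySem.Str.slice cha (some ((PySem.List.pyGet? (x0 :: y :: ys) (ji.1 - 1)).getD 0)) (some ji.2),
               PySem.Str.slice cha (some ji.2) none]
            else
              [PySem.Str.slice cha (some ((PySem.List.pyGet? (x0 :: y :: ys) (ji.1 - 1)).getD 0)) (some ji.2)]) ji := by
          funext acc ji; dsimp only; split_ifs <;> rfl
        rw [hbody, PySem.List.foldl_append_eq_flatMap, List.nil_append]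
        rw [pvA_loop cha (fun i => i) x0 y ys]
        simp [pvChain, pvSlice_zero]
    · -- side = "end"
      subst h
      have hfr : ¬(("end" : String) = "front") := by decide
      rw [if_neg hfr, if_pos rfl, if_neg hfr, if_pos rfl]
      simp only [List.map_cons, List.tail_cons, PySem.List.pyGet?_neg_one]
      rw [pvAlt_pieces_eq_chain]
      cases rest with
      | nil =>
        rw [if_pos (show [x0].length = 1 from rfl)]
        simp [pvChain, pvSlice_zero]
      | cons y ys =>
        have h1 : ¬((x0 :: y :: ys).length = 1) := by simp
        rw [if_neg h1]
        have hbody : (fun (acc : List String) (ji : Int × Int) =>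
            if ji.1 = 0 then acc ++ [PySem.Str.slice cha none (some (ji.2 + 1))]
            else if ji.1 = ((x0 :: y :: ys).length : Int) - 1 then
              acc ++ [PySem.Str.slice cha (some ((PySem.List.pyGet? (x0 :: y :: ys) (ji.1 - 1)).getD 0 + 1)) (some (ji.2 + 1)),
                      PySem.Str.slice cha (some (ji.2 + 1)) none]
            else
              acc ++ [PySem.Str.slice cha (some ((PySem.List.pyGet? (x0 :: y :: ys) (ji.1 - 1)).getD 0 + 1)) (some (ji.2 + 1))])
            = fun acc ji => acc ++ (fun (ji : Int × Int) =>
            if ji.1 = 0 then [PySem.Str.slice cha none (some ((fun i => i + 1) ji.2))]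
            else if ji.1 = ((x0 :: y :: ys).length : Int) - 1 then
              [PySem.Str.slice cha (some ((fun i => i + 1) ((PySem.List.pyGet? (x0 :: y :: ys) (ji.1 - 1)).getD 0))) (some ((fun i => i + 1) ji.2)),
               PySem.Str.slice cha (some ((fun i => i + 1) ji.2)) none]
            else
              [PySem.Str.slice cha (some ((fun i => i + 1) ((PySem.List.pyGet? (x0 :: y :: ys) (ji.1 - 1)).getD 0))) (some ((fun i => i + 1) ji.2))]) ji := by
          funext acc ji; dsimp only; split_ifs <;> rfl
        rw [hbody, PySem.List.foldl_append_eq_flatMap, List.nil_append]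
        rw [pvA_loop cha (fun i => i + 1) x0 y ys]
        simp [pvChain, pvSlice_zero]
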